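-- pv_equiv track=rewrite | github.com/light-le/AdventOfCode | 2023/day18.py | get_trench_points
-- ===== SOURCE A (Python) =====
-- from collections import namedtuple
--
-- Point = namedtuple('Point', ['row', 'col', 'shape'])
--
-- def get_trench_points(dirs, stepl, corners_only: bool=False):
--     trenches = []
--     point = Point(0, 0, '-')
--
--     next_dirs = dirs[1:] + [dirs[0]]
--     for dir, steps, next_dir in zip(dirs, stepl, next_dirs):
--         if dir == 'R':
--             if not corners_only:
--                 new_points = [Point(point.row, c, '-') for c in range(point.col+1, point.col+steps)]
--             if next_dir == 'U':
--                 corner_shape = 'J'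
--             elif next_dir == 'D':
--                 corner_shape = '7'
--             corner_point = Point(point.row, point.col+steps, corner_shape)
--         elif dir == 'U':
--             if not corners_only:
--                 new_points = [Point(r, point.col, '|') for r in range(point.row-1, point.row-steps, -1)]
--             if next_dir == 'R':
--                 corner_shape = 'F'
--             elif next_dir == 'L':
--                 corner_shape = '7'
--             corner_point = Point(point.row-steps, point.col, corner_shape)
--         elif dir == 'L':
--             if not corners_only:
--                 new_points = [Point(point.row, c, '-') for c in range(point.col-1, point.col-steps, -1)]
--             if next_dir == 'U':
--                 corner_shape = 'L'
--             elif next_dir == 'D':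
--                 corner_shape = 'F'
--             corner_point = Point(point.row, point.col-steps, corner_shape)
--         elif dir == 'D':
--             if not corners_only:
--                 new_points = [Point(r, point.col, '|') for r in range(point.row+1, point.row+steps)]
--             if next_dir == 'R':
--                 corner_shape = 'L'
--             elif next_dir == 'L':
--                 corner_shape = 'J'
--             corner_point = Point(point.row+steps, point.col, corner_shape)
--         else:
--             raise Exception(f'Invalid dir {dir}')
--
--         if corners_only:
--             new_points = [corner_point]
--         else:
--             new_points.append(corner_point)
--
--         point = corner_point
--         trenches.extend(new_points)
--     return trenches
-- ===== SOURCE B (Python) =====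
-- DELTA = {'R': (0, 1), 'L': (0, -1), 'U': (-1, 0), 'D': (1, 0)}
-- CORNER = {('R', 'U'): 'J', ('R', 'D'): '7', ('U', 'R'): 'F', ('U', 'L'): '7',
--           ('L', 'U'): 'L', ('L', 'D'): 'F', ('D', 'R'): 'L', ('D', 'L'): 'J'}
--
-- def get_trench_points(dirs, stepl, corners_only: bool = False):
--     # pass 1: vertex list by prefix-summing the displacement of each instruction
--     verts = [(0, 0)]
--     r = c = 0
--     for d, s in zip(dirs, stepl):
--         dr, dc = DELTA[d]
--         r, c = r + s * dr, c + s * dc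
--         verts.append((r, c))
--     # pass 2: label each vertex after the start with its corner glyph
--     corners = [(vr, vc, CORNER[d, nd])
--                for (vr, vc), d, nd in zip(verts[1:], dirs, dirs[1:] + dirs[:1])]
--     if corners_only:
--         return corners
--     # pass 3: interpolate the open segment between consecutive vertices, then the corner
--     trench = []
--     for (r0, c0), d, (r1, c1, shape) in zip(verts, dirs, corners):
--         dr, dc = DELTA[d]
--         if dr == 0:
--             trench.extend((r0, cc, '-') for cc in range(c0 + dc, c1, dc))
--         else:
--             trench.extend((rr, c0, '|') for rr in range(r0 + dr, r1, dr))
--         trench.append((r1, c1, shape))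
--     return trench
-- ===== Notes on version B (the rewrite author's own statement) =====
-- stated objective: alternative
-- what changed: Replaces A's single stateful walk (four per-direction branches each emitting interiors and picking a corner glyph) by a three-stage pipeline over intermediate data: first a vertex list built by prefix-summing displacements, then corner glyphs by zipping consecutive direction pairs against those vertices, then interiors obtained geometrically by interpolating the open segment between consecutive vertices (shape chosen by whether the row changes).
import Mathlib
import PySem

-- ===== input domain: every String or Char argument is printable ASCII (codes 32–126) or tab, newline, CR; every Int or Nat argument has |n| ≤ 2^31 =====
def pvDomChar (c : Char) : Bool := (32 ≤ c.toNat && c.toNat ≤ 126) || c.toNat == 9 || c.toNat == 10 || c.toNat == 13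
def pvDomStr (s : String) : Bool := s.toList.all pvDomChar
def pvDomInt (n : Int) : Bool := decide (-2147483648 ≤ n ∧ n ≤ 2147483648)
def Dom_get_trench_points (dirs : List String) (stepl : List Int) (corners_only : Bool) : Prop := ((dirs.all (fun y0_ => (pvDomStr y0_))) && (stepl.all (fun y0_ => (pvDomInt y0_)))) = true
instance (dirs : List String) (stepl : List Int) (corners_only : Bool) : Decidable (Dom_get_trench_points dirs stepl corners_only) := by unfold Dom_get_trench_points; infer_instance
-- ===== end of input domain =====

-- B replaces A's single stateful walk by a three-stage pipeline (vertex prefix sums, corner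
-- labels, geometric interpolation between consecutive vertices); return values only —
-- neither version mutates its arguments.

-- ===== PORT A =====
-- One iteration per (dir, steps, next_dir) triple of Python's zip; state = current point
-- (pr, pc), the corner_shape variable cs, and the accumulated trenches list. Python's
-- corner_shape is unbound before its first assignment (UnboundLocalError on a degenerate
-- first pair); we seed it with "-": such inputs are outside Pre_.
def gtpA_loop (co : Bool) : List (String × Int × String) → Int → Int → String → List (Int × Int × String) → List (Int × Int × String)
  | [], _, _, _, acc => acc
  | (dir, steps, nd) :: rest, pr, pc, cs, acc =>
    if dir == "R" then
      let nps := (PySem.List.pyRange (pc+1) (pc+steps) 1).map (fun x => (pr, x, "-"))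
      let cs' := if nd == "U" then "J" else if nd == "D" then "7" else cs
      let nps := if co then [(pr, pc + steps, cs')] else nps ++ [(pr, pc + steps, cs')]
      gtpA_loop co rest pr (pc + steps) cs' (acc ++ nps)
    else if dir == "U" then
      let nps := (PySem.List.pyRange (pr-1) (pr-steps) (-1)).map (fun x => (x, pc, "|"))
      let cs' := if nd == "R" then "F" else if nd == "L" then "7" else cs
      let nps := if co then [(pr - steps, pc, cs')] else nps ++ [(pr - steps, pc, cs')]
      gtpA_loop co rest (pr - steps) pc cs' (acc ++ nps)
    else if dir == "L" then
      let nps := (PySem.List.pyRange (pc-1) (pc-steps) (-1)).map (fun x => (pr, x, "-"))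
      let cs' := if nd == "U" then "L" else if nd == "D" then "F" else cs
      let nps := if co then [(pr, pc - steps, cs')] else nps ++ [(pr, pc - steps, cs')]
      gtpA_loop co rest pr (pc - steps) cs' (acc ++ nps)
    else if dir == "D" then
      let nps := (PySem.List.pyRange (pr+1) (pr+steps) 1).map (fun x => (x, pc, "|"))
      let cs' := if nd == "R" then "L" else if nd == "L" then "J" else cs
      let nps := if co then [(pr + steps, pc, cs')] else nps ++ [(pr + steps, pc, cs')]
      gtpA_loop co rest (pr + steps) pc cs' (acc ++ nps)
    else acc  -- Python: raise Exception(f'Invalid dir {dir}') — outside Pre_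

def get_trench_points (dirs : List String) (stepl : List Int) (corners_only : Bool) : List (Int × Int × String) :=
  match dirs with
  | [] => []  -- Python raises IndexError on dirs[0] here — outside Pre_
  | d0 :: _ =>
    let next_dirs := dirs.drop 1 ++ [d0]          -- dirs[1:] + [dirs[0]]
    gtpA_loop corners_only (dirs.zip (stepl.zip next_dirs)) 0 0 "-" []

-- ===== PORT B =====
def pvDELTA : PySem.Dict String (Int × Int) :=
  PySem.Dict.ofList [("R", (0, 1)), ("L", (0, -1)), ("U", (-1, 0)), ("D", (1, 0))]
def pvCORNER : PySem.Dict (String × String) String :=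
  PySem.Dict.ofList [(("R","U"),"J"), (("R","D"),"7"), (("U","R"),"F"), (("U","L"),"7"),
                     (("L","U"),"L"), (("L","D"),"F"), (("D","R"),"L"), (("D","L"),"J")]

-- KeyError on a missing dict key (invalid dir, or a non-turn (dir, next_dir) pair) is outside
-- Pre_; the .getD junk defaults are never reached inside it.
-- pass 1: vertex list by prefix-summing displacements (state r, c threads Python's r, c)
def gtpB_vloop : List (String × Int) → Int → Int → List (Int × Int)
  | [], _, _ => []
  | (d, s) :: rest, r, c =>
    (r + s * ((pvDELTA.get? d).getD (0, 0)).1, c + s * ((pvDELTA.get? d).getD (0, 0)).2) ::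
      gtpB_vloop rest (r + s * ((pvDELTA.get? d).getD (0, 0)).1) (c + s * ((pvDELTA.get? d).getD (0, 0)).2)

-- pass 2: the comprehension's per-element body
def gtpB_corner (x : (Int × Int) × String × String) : Int × Int × String :=
  (x.1.1, x.1.2, (pvCORNER.get? (x.2.1, x.2.2)).getD "")

-- pass 3: interpolate the open segment between consecutive vertices, then the corner
def gtpB_expand : List ((Int × Int) × String × (Int × Int × String)) → List (Int × Int × String)
  | [] => []
  | ((r0, c0), d, (r1, c1, sh)) :: rest =>
    (if ((pvDELTA.get? d).getD (0, 0)).1 == 0 then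
        (PySem.List.pyRange (c0 + ((pvDELTA.get? d).getD (0, 0)).2) c1 ((pvDELTA.get? d).getD (0, 0)).2).map (fun cc => (r0, cc, "-"))
      else
        (PySem.List.pyRange (r0 + ((pvDELTA.get? d).getD (0, 0)).1) r1 ((pvDELTA.get? d).getD (0, 0)).1).map (fun rr => (rr, c0, "|")))
    ++ [(r1, c1, sh)] ++ gtpB_expand rest

def get_trench_points_alt (dirs : List String) (stepl : List Int) (corners_only : Bool) : List (Int × Int × String) :=
  let verts : List (Int × Int) := (0, 0) :: gtpB_vloop (dirs.zip stepl) 0 0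
  let nds := PySem.List.slice dirs (some 1) none ++ PySem.List.slice dirs none (some 1)  -- dirs[1:] + dirs[:1]
  let corners := ((PySem.List.slice verts (some 1) none).zip (dirs.zip nds)).map gtpB_corner
  if corners_only then corners else gtpB_expand (verts.zip (dirs.zip corners))

-- ===== PRECONDITION & SPEC =====
-- corner shape table: defined exactly on the eight (dir, next_dir) turn pairs
def pvTurn (d nd : String) : Option String :=
  if d == "R" then (if nd == "U" then some "J" else if nd == "D" then some "7" else none)
  else if d == "U" then (if nd == "R" then some "F" else if nd == "L" then some "7" else none)
  else if d == "L" then (if nd == "U" then some "L" else if nd == "D" then some "F" else none)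
  else if d == "D" then (if nd == "R" then some "L" else if nd == "L" then some "J" else none)
  else none

-- Pre_ excludes: empty dirs (A raises IndexError); an invalid direction in the processed prefix
-- (A raises Exception); and a processed (dir, next_dir) pair that is not one of the eight turns —
-- there A either raises UnboundLocalError (on the first instruction) or RETURNS a corner carrying
-- the STALE corner_shape left over from the previous iteration, while B's dict lookup raises
-- KeyError (see claim.json cites).
def Pre_get_trench_points (dirs : List String) (stepl : List Int) (corners_only : Bool) : Prop :=
  dirs ≠ [] ∧
  ∀ t ∈ dirs.zip (stepl.zip (dirs.drop 1 ++ [dirs.headD ""])), (pvTurn t.1 t.2.2).isSome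
instance (dirs : List String) (stepl : List Int) (corners_only : Bool) : Decidable (Pre_get_trench_points dirs stepl corners_only) := by
  unfold Pre_get_trench_points; infer_instance

def pvWitness_get_trench_points : List String × List Int × Bool := (["R", "D", "L", "U"], [3, 2, 3, 2], false)

def Spec_get_trench_points (dirs : List String) (stepl : List Int) (corners_only : Bool) (out : List (Int × Int × String)) : Prop := out = get_trench_points_alt dirs stepl corners_only
instance (dirs : List String) (stepl : List Int) (corners_only : Bool) (out : List (Int × Int × String)) : Decidable (Spec_get_trench_points dirs stepl corners_only out) := by unfold Spec_get_trench_points; infer_instance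

-- ===== CLAIM (what is proved, stated in full; the proofs are below) =====
def Claim_equal_get_trench_points : Prop := ∀ (dirs : List String) (stepl : List Int) (corners_only : Bool), Dom_get_trench_points dirs stepl corners_only → Pre_get_trench_points dirs stepl corners_only → Spec_get_trench_points dirs stepl corners_only (get_trench_points dirs stepl corners_only)

-- ===== LEMMAS AND PROOFS =====

-- the common "fused" form both proofs reduce to: one corner (and, unless co, B-style interiors)
-- per (dir, steps, next_dir) triple, state = current point
def gtpFused (co : Bool) : List (String × Int × String) → Int → Int → List (Int × Int × String)
  | [], _, _ => []
  | (d, s, nd) :: rest, r, c =>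
    (if co then [(r + s * ((pvDELTA.get? d).getD (0, 0)).1, c + s * ((pvDELTA.get? d).getD (0, 0)).2, (pvCORNER.get? (d, nd)).getD "")]
     else (if ((pvDELTA.get? d).getD (0, 0)).1 == 0 then
            (PySem.List.pyRange (c + ((pvDELTA.get? d).getD (0, 0)).2) (c + s * ((pvDELTA.get? d).getD (0, 0)).2) ((pvDELTA.get? d).getD (0, 0)).2).map (fun cc => (r, cc, "-"))
          else
            (PySem.List.pyRange (r + ((pvDELTA.get? d).getD (0, 0)).1) (r + s * ((pvDELTA.get? d).getD (0, 0)).1) ((pvDELTA.get? d).getD (0, 0)).1).map (fun rr => (rr, c, "|")))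
          ++ [(r + s * ((pvDELTA.get? d).getD (0, 0)).1, c + s * ((pvDELTA.get? d).getD (0, 0)).2, (pvCORNER.get? (d, nd)).getD "")])
    ++ gtpFused co rest (r + s * ((pvDELTA.get? d).getD (0, 0)).1) (c + s * ((pvDELTA.get? d).getD (0, 0)).2)

theorem pvA_eq_fused (co : Bool) : ∀ (ts : List (String × Int × String)),
    (∀ t ∈ ts, (pvTurn t.1 t.2.2).isSome) →
    ∀ (r c : Int) (cs : String) (acc : List (Int × Int × String)),
    gtpA_loop co ts r c cs acc = acc ++ gtpFused co ts r c := by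
  intro ts
  induction ts with
  | nil => intro _ r c cs acc; simp [gtpA_loop, gtpFused]
  | cons t rest IH =>
    obtain ⟨d, s, nd⟩ := t
    intro hv r c cs acc
    have hhead := hv (d, s, nd) List.mem_cons_self
    have hrest : ∀ t ∈ rest, (pvTurn t.1 t.2.2).isSome := fun t ht => hv t (List.mem_cons_of_mem _ ht)
    by_cases h1 : d = "R"
    · subst h1
      by_cases h2 : nd = "U"
      · subst h2
        simp only [gtpA_loop, gtpFused, show (("R":String) == "R") = true by decide, show (("U":String) == "R") = false by decide, show (("R":String) == "U") = false by decide, show (("U":String) == "U") = true by decide, show (("R":String) == "L") = false by decide, show (("U":String) == "L") = false by decide, show (("R":String) == "D") = false by decide, show (("U":String) == "D") = false by decide,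
          show ((pvDELTA.get? "R").getD ((0:Int), (0:Int))) = ((0:Int), (1:Int)) from rfl,
          show ((pvCORNER.get? ("R", "U")).getD "") = "J" from rfl,
          show ((0:Int) == 0) = true by decide, Bool.false_eq_true, if_true, if_false]
        rw [show r + s*(0:Int) = r from by ring, show c + s*(1:Int) = c + s from by ring]
        rw [IH hrest]
        cases co <;> simp [List.append_assoc]
      · by_cases h3 : nd = "D"
        · subst h3
          simp only [gtpA_loop, gtpFused, show (("R":String) == "R") = true by decide, show (("D":String) == "R") = false by decide, show (("R":String) == "U") = false by decide, show (("D":String) == "U") = false by decide, show (("R":String) == "L") = false by decide, show (("D":String) == "L") = false by decide, show (("R":String) == "D") = false by decide, show (("D":String) == "D") = true by decide,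
            show ((pvDELTA.get? "R").getD ((0:Int), (0:Int))) = ((0:Int), (1:Int)) from rfl,
            show ((pvCORNER.get? ("R", "D")).getD "") = "7" from rfl,
            show ((0:Int) == 0) = true by decide, Bool.false_eq_true, if_true, if_false]
          rw [show r + s*(0:Int) = r from by ring, show c + s*(1:Int) = c + s from by ring]
          rw [IH hrest]
          cases co <;> simp [List.append_assoc]
        · exfalso; simp [pvTurn, h2, h3] at hhead
    · by_cases h1b : d = "U"
      · subst h1b
        by_cases h2 : nd = "R"
        · subst h2
          simp only [gtpA_loop, gtpFused, show (("U":String) == "R") = false by decide, show (("R":String) == "R") = true by decide, show (("U":String) == "U") = true by decide, show (("R":String) == "U") = false by decide, show (("U":String) == "L") = false by decide, show (("R":String) == "L") = false by decide, show (("U":String) == "D") = false by decide, show (("R":String) == "D") = false by decide,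
            show ((pvDELTA.get? "U").getD ((0:Int), (0:Int))) = ((-1:Int), (0:Int)) from rfl,
            show ((pvCORNER.get? ("U", "R")).getD "") = "F" from rfl,
            show ((-1:Int) == 0) = false by decide, Bool.false_eq_true, if_true, if_false]
          rw [show r + s*(-1:Int) = r - s from by ring, show c + s*(0:Int) = c from by ring, show r + (-1:Int) = r - 1 from by ring]
          rw [IH hrest]
          cases co <;> simp [List.append_assoc]
        · by_cases h3 : nd = "L"
          · subst h3
            simp only [gtpA_loop, gtpFused, show (("U":String) == "R") = false by decide, show (("L":String) == "R") = false by decide, show (("U":String) == "U") = true by decide, show (("L":String) == "U") = false by decide, show (("U":String) == "L") = false by decide, show (("L":String) == "L") = true by decide, show (("U":String) == "D") = false by decide, show (("L":String) == "D") = false by decide,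
              show ((pvDELTA.get? "U").getD ((0:Int), (0:Int))) = ((-1:Int), (0:Int)) from rfl,
              show ((pvCORNER.get? ("U", "L")).getD "") = "7" from rfl,
              show ((-1:Int) == 0) = false by decide, Bool.false_eq_true, if_true, if_false]
            rw [show r + s*(-1:Int) = r - s from by ring, show c + s*(0:Int) = c from by ring, show r + (-1:Int) = r - 1 from by ring]
            rw [IH hrest]
            cases co <;> simp [List.append_assoc]
          · exfalso; simp [pvTurn, h2, h3] at hhead
      · by_cases h1c : d = "L"
        · subst h1c
          by_cases h2 : nd = "U"
          · subst h2
            simp only [gtpA_loop, gtpFused, show (("L":String) == "R") = false by decide, show (("U":String) == "R") = false by decide, show (("L":String) == "U") = false by decide, show (("U":String) == "U") = true by decide, show (("L":String) == "L") = true by decide, show (("U":String) == "L") = false by decide, show (("L":String) == "D") = false by decide, show (("U":String) == "D") = false by decide,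
              show ((pvDELTA.get? "L").getD ((0:Int), (0:Int))) = ((0:Int), (-1:Int)) from rfl,
              show ((pvCORNER.get? ("L", "U")).getD "") = "L" from rfl,
              show ((0:Int) == 0) = true by decide, Bool.false_eq_true, if_true, if_false]
            rw [show r + s*(0:Int) = r from by ring, show c + s*(-1:Int) = c - s from by ring, show c + (-1:Int) = c - 1 from by ring]
            rw [IH hrest]
            cases co <;> simp [List.append_assoc]
          · by_cases h3 : nd = "D"
            · subst h3
              simp only [gtpA_loop, gtpFused, show (("L":String) == "R") = false by decide, show (("D":String) == "R") = false by decide, show (("L":String) == "U") = false by decide, show (("D":String) == "U") = false by decide, show (("L":String) == "L") = true by decide, show (("D":String) == "L") = false by decide, show (("L":String) == "D") = false by decide, show (("D":String) == "D") = true by decide,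
                show ((pvDELTA.get? "L").getD ((0:Int), (0:Int))) = ((0:Int), (-1:Int)) from rfl,
                show ((pvCORNER.get? ("L", "D")).getD "") = "F" from rfl,
                show ((0:Int) == 0) = true by decide, Bool.false_eq_true, if_true, if_false]
              rw [show r + s*(0:Int) = r from by ring, show c + s*(-1:Int) = c - s from by ring, show c + (-1:Int) = c - 1 from by ring]
              rw [IH hrest]
              cases co <;> simp [List.append_assoc]
            · exfalso; simp [pvTurn, h2, h3] at hhead
        · by_cases h1d : d = "D"
          · subst h1d
            by_cases h2 : nd = "R"
            · subst h2
              simp only [gtpA_loop, gtpFused, show (("D":String) == "R") = false by decide, show (("R":String) == "R") = true by decide, show (("D":String) == "U") = false by decide, show (("R":String) == "U") = false by decide, show (("D":String) == "L") = false by decide, show (("R":String) == "L") = false by decide, show (("D":String) == "D") = true by decide, show (("R":String) == "D") = false by decide,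
                show ((pvDELTA.get? "D").getD ((0:Int), (0:Int))) = ((1:Int), (0:Int)) from rfl,
                show ((pvCORNER.get? ("D", "R")).getD "") = "L" from rfl,
                show ((1:Int) == 0) = false by decide, Bool.false_eq_true, if_true, if_false]
              rw [show r + s*(1:Int) = r + s from by ring, show c + s*(0:Int) = c from by ring]
              rw [IH hrest]
              cases co <;> simp [List.append_assoc]
            · by_cases h3 : nd = "L"
              · subst h3
                simp only [gtpA_loop, gtpFused, show (("D":String) == "R") = false by decide, show (("L":String) == "R") = false by decide, show (("D":String) == "U") = false by decide, show (("L":String) == "U") = false by decide, show (("D":String) == "L") = false by decide, show (("L":String) == "L") = true by decide, show (("D":String) == "D") = true by decide, show (("L":String) == "D") = false by decide,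
                  show ((pvDELTA.get? "D").getD ((0:Int), (0:Int))) = ((1:Int), (0:Int)) from rfl,
                  show ((pvCORNER.get? ("D", "L")).getD "") = "J" from rfl,
                  show ((1:Int) == 0) = false by decide, Bool.false_eq_true, if_true, if_false]
                rw [show r + s*(1:Int) = r + s from by ring, show c + s*(0:Int) = c from by ring]
                rw [IH hrest]
                cases co <;> simp [List.append_assoc]
              · exfalso; simp [pvTurn, h2, h3] at hhead
          · exfalso; simp [pvTurn, h1, h1b, h1c, h1d] at hhead

theorem pvB_corners : ∀ (dirs : List String) (stepl : List Int) (nds : List String) (r c : Int),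
    ((gtpB_vloop (dirs.zip stepl) r c).zip (dirs.zip nds)).map gtpB_corner
      = gtpFused true (dirs.zip (stepl.zip nds)) r c := by
  intro dirs
  induction dirs with
  | nil => intro stepl nds r c; simp [gtpB_vloop, gtpFused]
  | cons d dirs IH =>
    intro stepl nds r c
    cases stepl with
    | nil => simp [gtpB_vloop, gtpFused]
    | cons s stepl =>
      cases nds with
      | nil => simp [gtpB_vloop, gtpFused]
      | cons nd nds =>
        simp only [List.zip_cons_cons, gtpB_vloop, gtpFused, List.map_cons, gtpB_corner]
        rw [IH]
        simp

theorem pvB_expand : ∀ (dirs : List String) (stepl : List Int) (nds : List String) (r c : Int),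
    gtpB_expand (((r, c) :: gtpB_vloop (dirs.zip stepl) r c).zip
        (dirs.zip (((gtpB_vloop (dirs.zip stepl) r c).zip (dirs.zip nds)).map gtpB_corner)))
      = gtpFused false (dirs.zip (stepl.zip nds)) r c := by
  intro dirs
  induction dirs with
  | nil => intro stepl nds r c; simp [gtpB_vloop, gtpB_expand, gtpFused]
  | cons d dirs IH =>
    intro stepl nds r c
    cases stepl with
    | nil => simp [gtpB_vloop, gtpB_expand, gtpFused]
    | cons s stepl =>
      cases nds with
      | nil => simp [gtpB_vloop, gtpB_expand, gtpFused]
      | cons nd nds =>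
        simp only [List.zip_cons_cons, gtpB_vloop, List.map_cons, gtpB_corner, gtpB_expand, gtpFused]
        rw [IH]
        simp

-- ===== VERDICT (by name: the statement is the Claim_ definition above) =====
theorem get_trench_points_spec : Claim_equal_get_trench_points := by
  intro dirs stepl co _ hpre
  obtain ⟨hne, hv⟩ := hpre
  unfold Spec_get_trench_points get_trench_points get_trench_points_alt
  cases dirs with
  | nil => exact absurd rfl hne
  | cons d0 ds =>
    simp only
    have hnds : PySem.List.slice (d0 :: ds) (some 1) none ++ PySem.List.slice (d0 :: ds) none (some 1) = ds ++ [d0] := by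
      rw [PySem.List.slice_from_one, PySem.List.slice_to _ _]
      · rfl
      · norm_num
    have hverts : ∀ v : List (Int × Int), PySem.List.slice ((0, 0) :: v) (some 1) none = v := by
      intro v; rw [PySem.List.slice_from_one]; rfl
    simp only [List.headD_cons, List.drop_one, List.tail_cons] at hv ⊢
    rw [hnds, hverts]
    rw [pvA_eq_fused co _ hv 0 0 "-" []]
    cases co
    · simp only [if_neg (by decide : ¬ (false = true))]
      rw [pvB_expand]
      rfl
    · rw [if_pos rfl, pvB_corners]
      exact List.nil_append _
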